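-- pv_equiv track=rewrite | github.com/dna-storage/dnastorage | dnastorage/system/header.py | decode_primer_diff
-- ===== SOURCE A (Python) =====
-- def decode_primer_diff(data,oprimer):
--     sz = data[0]
--     if sz==0:
--         return oprimer,1
--     baseVal = [ 'A', 'C', 'G', 'T' ]
--     nprimer = [ _ for _ in oprimer ]
--     for i in range(sz):
--         val = data[1+i]
--         base = baseVal[(val&0xC0)>>6]
--         pos = val&0x3F
--         nprimer[pos] = base
--     return "".join(nprimer),sz+1
-- ===== SOURCE B (Python) =====
-- def decode_primer_diff(data, oprimer):
--     sz = data[0]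
--     if sz == 0:
--         return oprimer, 1
--     out = []
--     for i, ch in enumerate(oprimer):
--         c = ch
--         for j in range(sz):
--             val = data[1 + j]
--             if val & 0x3F == i:
--                 c = "ACGT"[(val & 0xC0) >> 6]
--         out.append(c)
--     return "".join(out), sz + 1
-- ===== Notes on version B (the rewrite author's own statement) =====
-- stated objective: alternative
-- what changed: Inverts the traversal: instead of copying oprimer to a char list and mutating the targeted positions diff-by-diff, B builds the result character by character, scanning the sz diff entries for each position and keeping the last matching base (no char-list mutation, no index structure); equivalent because the last write wins in both.
import Mathlib
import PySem

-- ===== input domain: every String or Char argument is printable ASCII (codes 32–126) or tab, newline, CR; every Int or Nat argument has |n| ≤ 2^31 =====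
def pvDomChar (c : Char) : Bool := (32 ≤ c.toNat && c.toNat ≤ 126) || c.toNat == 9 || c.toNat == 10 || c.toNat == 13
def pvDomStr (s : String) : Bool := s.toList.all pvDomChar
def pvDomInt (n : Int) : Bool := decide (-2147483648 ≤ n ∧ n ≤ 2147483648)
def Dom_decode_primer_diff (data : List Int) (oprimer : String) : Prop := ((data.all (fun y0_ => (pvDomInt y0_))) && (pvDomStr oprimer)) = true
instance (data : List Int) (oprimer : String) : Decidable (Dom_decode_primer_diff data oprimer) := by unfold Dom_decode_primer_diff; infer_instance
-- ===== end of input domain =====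

-- B inverts the traversal: instead of mutating a char list diff-by-diff, it builds the
-- result character by character, scanning the diff entries for each position (alternative
-- decomposition; same values because the last write wins in both).

-- ===== PORT A =====
-- (val & 0xC0) >> 6: the masked value is nonnegative, so >> 6 is exactly floordiv by 64.
def decode_primer_diff (data : List Int) (oprimer : String) : String × Int :=
  let sz := PySem.List.pyGetD data 0 0
  if sz = 0 then (oprimer, 1)
  else
    let baseVal : List Char := ['A', 'C', 'G', 'T']
    let nprimer := oprimer.toList
    let nprimer := (PySem.List.pyRange 0 sz 1).foldl (fun np i =>
      let val := PySem.List.pyGetD data (1 + i) 0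
      let base := PySem.List.pyGetD baseVal (PySem.Int.floordiv (PySem.Int.band val 192) 64) ' '
      let pos := PySem.Int.band val 63
      PySem.List.pySetD np pos base) nprimer
    (String.ofList nprimer, sz + 1)

-- ===== PORT B =====
def decode_primer_diff_alt (data : List Int) (oprimer : String) : String × Int :=
  let sz := PySem.List.pyGetD data 0 0
  if sz = 0 then (oprimer, 1)
  else
    let out := (PySem.List.enumerate oprimer.toList 0).map (fun p =>
      (PySem.List.pyRange 0 sz 1).foldl (fun c j =>
        let val := PySem.List.pyGetD data (1 + j) 0
        if PySem.Int.band val 63 = p.1 then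
          PySem.List.pyGetD ("ACGT".toList) (PySem.Int.floordiv (PySem.Int.band val 192) 64) ' '
        else c) p.2)
    (String.ofList out, sz + 1)

-- ===== PRECONDITION & SPEC =====
-- Pre_ excludes exactly the inputs where the Python A raises: empty data (data[0]),
-- too few diff entries (data[1+i]) and a diff position past the end of oprimer (IndexError).
def Pre_decode_primer_diff (data : List Int) (oprimer : String) : Prop :=
  data ≠ [] ∧ (0 < data.headI →
    data.headI < (data.length : Int) ∧
    ∀ v ∈ (data.drop 1).take data.headI.toNat, PySem.Int.band v 63 < (oprimer.toList.length : Int))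
instance (data : List Int) (oprimer : String) : Decidable (Pre_decode_primer_diff data oprimer) := by
  unfold Pre_decode_primer_diff; infer_instance
def pvWitness_decode_primer_diff : List Int × String := ([1, 130], "AAAA")

def Spec_decode_primer_diff (data : List Int) (oprimer : String) (out : String × Int) : Prop := out = decode_primer_diff_alt data oprimer
instance (data : List Int) (oprimer : String) (out : String × Int) : Decidable (Spec_decode_primer_diff data oprimer out) := by unfold Spec_decode_primer_diff; infer_instance

-- ===== CLAIM (what is proved, stated in full; the proofs are below) =====
def Claim_equal_decode_primer_diff : Prop := ∀ (data : List Int) (oprimer : String), Dom_decode_primer_diff data oprimer → Pre_decode_primer_diff data oprimer → Spec_decode_primer_diff data oprimer (decode_primer_diff data oprimer)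

-- ===== LEMMAS AND PROOFS =====

-- length of A's mutation loop: pySetD preserves length
theorem pvLength_foldl_setD (us : List (Int × Char)) (l : List Char) :
    (us.foldl (fun np pb => PySem.List.pySetD np pb.1 pb.2) l).length = l.length := by
  induction us generalizing l with
  | nil => rfl
  | cons pb rest ih => simp [List.foldl_cons, ih, PySem.List.length_pySetD]

-- the character at index k after A's sequence of writes = B's per-position scan over the
-- same updates, starting from the original character (last write wins on both sides)
theorem pvGetElem_foldl_setD (us : List (Int × Char)) (l : List Char) (k : Nat)
    (hk : k < l.length) (hpos : ∀ pb ∈ us, 0 ≤ pb.1) :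
    (us.foldl (fun np pb => PySem.List.pySetD np pb.1 pb.2) l)[k]'(by
        rw [pvLength_foldl_setD]; exact hk)
      = us.foldl (fun c pb => if pb.1 = (k : Int) then pb.2 else c) l[k] := by
  induction us generalizing l with
  | nil => rfl
  | cons pb rest ih =>
    have h0 : 0 ≤ pb.1 := hpos pb (List.mem_cons_self ..)
    have hr : ∀ q ∈ rest, 0 ≤ q.1 := fun q hq => hpos q (List.mem_cons_of_mem _ hq)
    simp only [List.foldl_cons]
    have hset : PySem.List.pySetD l pb.1 pb.2 = l.set pb.1.toNat pb.2 :=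
      PySem.List.pySetD_of_nonneg _ _ h0
    have hk' : k < (PySem.List.pySetD l pb.1 pb.2).length := by
      rw [PySem.List.length_pySetD]; exact hk
    refine (ih (PySem.List.pySetD l pb.1 pb.2) hk' hr).trans ?_
    congr 1
    simp only [hset, List.getElem_set]
    by_cases hc : pb.1 = (k : Int)
    · simp [hc]
    · have : pb.1.toNat ≠ k := by omega
      simp [this, hc]

-- ===== VERDICT (by name: the statement is the Claim_ definition above) =====
theorem decode_primer_diff_spec : Claim_equal_decode_primer_diff := by
  intro data oprimer _hdom _hpre
  unfold Spec_decode_primer_diff decode_primer_diff decode_primer_diff_alt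
  set sz := PySem.List.pyGetD data 0 0 with hsz
  by_cases h0 : sz = 0
  · simp [h0]
  · rw [if_neg h0, if_neg h0]
    refine Prod.ext ?_ rfl
    show String.ofList _ = String.ofList _
    congr 1
    set l := oprimer.toList with hl
    set f : Int → Int × Char := fun i =>
      (PySem.Int.band (PySem.List.pyGetD data (1 + i) 0) 63,
       PySem.List.pyGetD ("ACGT".toList)
         (PySem.Int.floordiv (PySem.Int.band (PySem.List.pyGetD data (1 + i) 0) 192) 64) ' ')
      with hf
    set us := (PySem.List.pyRange 0 sz 1).map f with hus
    have hpos : ∀ pb ∈ us, 0 ≤ pb.1 := by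
      intro pb hpb
      obtain ⟨i, _, rfl⟩ := List.mem_map.mp hpb
      simp only [hf]
      rw [PySem.Int.band_comm]
      exact PySem.Int.band_nonneg_of_nonneg_left _ (by norm_num)
    have hA : (PySem.List.pyRange 0 sz 1).foldl (fun np i =>
        PySem.List.pySetD np (PySem.Int.band (PySem.List.pyGetD data (1 + i) 0) 63)
          (PySem.List.pyGetD ['A','C','G','T']
            (PySem.Int.floordiv (PySem.Int.band (PySem.List.pyGetD data (1 + i) 0) 192) 64) ' ')) l
        = us.foldl (fun np pb => PySem.List.pySetD np pb.1 pb.2) l := by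
      rw [hus, List.foldl_map]; rfl
    rw [hA]
    apply List.ext_getElem
    · rw [pvLength_foldl_setD]
      simp [PySem.List.length_enumerate]
    · intro k h1 h2
      have hk : k < l.length := by rwa [pvLength_foldl_setD] at h1
      have hkE : k < (PySem.List.enumerate l 0).length := by
        rwa [PySem.List.length_enumerate]
      rw [pvGetElem_foldl_setD us l k hk hpos]
      rw [List.getElem_map, PySem.List.getElem_enumerate]
      simp only [Int.zero_add]
      rw [hus, List.foldl_map]
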